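-- pv_equiv track=rewrite | github.com/shangetang/internlm | trace_repo/fix_wrong_proofs_one_log.py | find_theorem_bounds
-- ===== SOURCE A (Python) =====
-- def find_theorem_bounds(lines, error_line_idx):
--     start = None
--     for i in range(error_line_idx, -1, -1):
--         if lines[i].strip().startswith(('theorem', 'lemma', 'def', 'example')):
--             start = i
--             break
--     if start is None:
--         return None, None
--
--     end = len(lines) - 2
--     for j in range(start + 1, len(lines)):
--         if lines[j].strip().startswith(('theorem', 'lemma', 'def', 'example')):
--             end = j - 1
--             break
--
--     return start, end
-- ===== SOURCE B (Python) =====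
-- _KEYWORDS = ('theorem', 'lemma', 'def', 'example')
--
--
-- def find_theorem_bounds(lines, error_line_idx):
--     # One forward pass collects every header line index; the bounds are then
--     # read off the header list instead of scanning the file twice.
--     headers = [i for i, line in enumerate(lines) if line.strip().startswith(_KEYWORDS)]
--     prev = [h for h in headers if h <= error_line_idx]
--     nxt = [h for h in headers if h > error_line_idx]
--     if not prev:
--         return None, None
--     end = nxt[0] - 1 if nxt else len(lines) - 2
--     return prev[-1], end
-- ===== Notes on version B (the rewrite author's own statement) =====
-- stated objective: alternative
-- what changed: Instead of A's two index scans (backward from the error line for the start, forward from the start for the next header), B builds the list of all header-line indices in one forward pass and reads start/end off that list (last header <= error line, first header after it).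
import Mathlib
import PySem

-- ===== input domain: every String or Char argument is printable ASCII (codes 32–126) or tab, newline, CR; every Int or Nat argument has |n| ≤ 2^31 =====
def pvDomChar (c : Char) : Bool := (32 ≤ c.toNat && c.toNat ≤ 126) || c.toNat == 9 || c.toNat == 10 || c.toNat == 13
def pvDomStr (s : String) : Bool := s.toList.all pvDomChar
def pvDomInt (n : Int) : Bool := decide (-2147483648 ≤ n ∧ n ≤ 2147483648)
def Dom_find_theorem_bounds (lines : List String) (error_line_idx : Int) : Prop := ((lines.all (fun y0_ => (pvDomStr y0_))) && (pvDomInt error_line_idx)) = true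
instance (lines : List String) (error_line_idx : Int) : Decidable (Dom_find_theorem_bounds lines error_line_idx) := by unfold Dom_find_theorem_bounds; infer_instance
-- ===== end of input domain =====

-- B replaces A's two index scans by one forward pass collecting all header indices,
-- then reads the bounds off that list; same cost, different decomposition (see claim).
-- ===== PORT A =====

-- lines[i].strip().startswith(('theorem', 'lemma', 'def', 'example'))
def pvKw (s : String) : Bool :=
  let t := PySem.Str.strip s
  PySem.Str.startswith t "theorem" || PySem.Str.startswith t "lemma" ||
    PySem.Str.startswith t "def" || PySem.Str.startswith t "example"

-- A's first loop: scan indices downward, break at the first keyword line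
def pvFindStartA (lines : List String) : List Int → Option Int
  | [] => none
  | i :: rest =>
    match PySem.List.pyGet? lines i with
    | none => none        -- IndexError in Python; such inputs are excluded by Pre_
    | some s => if pvKw s then some i else pvFindStartA lines rest

-- A's second loop: scan indices upward, break at the first keyword line
def pvFindEndA (lines : List String) (dflt : Int) : List Int → Int
  | [] => dflt
  | j :: rest =>
    match PySem.List.pyGet? lines j with
    | none => dflt        -- unreachable: every j is in range
    | some s => if pvKw s then j - 1 else pvFindEndA lines dflt rest

def find_theorem_bounds (lines : List String) (error_line_idx : Int) : Option Int × Option Int :=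
  match pvFindStartA lines (PySem.List.pyRange error_line_idx (-1) (-1)) with
  | none => (none, none)
  | some start =>
    (some start,
     some (pvFindEndA lines ((lines.length : Int) - 2)
            (PySem.List.pyRange (start + 1) (lines.length : Int) 1)))

-- ===== PORT B =====
def find_theorem_bounds_alt (lines : List String) (error_line_idx : Int) : Option Int × Option Int :=
  let headers := (PySem.List.enumerate lines).filterMap
      (fun p => if pvKw p.2 then some p.1 else none)
  let prev := headers.filter (fun h => decide (h ≤ error_line_idx))
  let nxt := headers.filter (fun h => decide (error_line_idx < h))
  match prev.getLast? with
  | none => (none, none)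
  | some s =>
    (some s,
     some (match nxt.head? with
           | some h => h - 1
           | none => (lines.length : Int) - 2))

-- ===== PRECONDITION & SPEC =====
-- A raises IndexError as soon as error_line_idx >= len(lines); those inputs are excluded.
def Pre_find_theorem_bounds (lines : List String) (error_line_idx : Int) : Prop :=
  error_line_idx < (lines.length : Int)
instance (lines : List String) (error_line_idx : Int) : Decidable (Pre_find_theorem_bounds lines error_line_idx) := by unfold Pre_find_theorem_bounds; infer_instance

def pvWitness_find_theorem_bounds : List String × Int := (["theorem foo", "  calc", "lemma bar", "  done"], 1)

def Spec_find_theorem_bounds (lines : List String) (error_line_idx : Int) (out : Option Int × Option Int) : Prop := out = find_theorem_bounds_alt lines error_line_idx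
instance (lines : List String) (error_line_idx : Int) (out : Option Int × Option Int) : Decidable (Spec_find_theorem_bounds lines error_line_idx out) := by unfold Spec_find_theorem_bounds; infer_instance

-- ===== CLAIM (what is proved, stated in full; the proofs are below) =====
def Claim_equal_find_theorem_bounds : Prop := ∀ (lines : List String) (error_line_idx : Int), Dom_find_theorem_bounds lines error_line_idx → Pre_find_theorem_bounds lines error_line_idx → Spec_find_theorem_bounds lines error_line_idx (find_theorem_bounds lines error_line_idx)


-- ===== LEMMAS AND PROOFS =====

-- the keyword test, as a function of a (Nat) line number
def kwN (lines : List String) (k : Nat) : Bool := pvKw (lines.getD k "")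
-- the same, at an Int index (only used at nonnegative in-range indices)
def kwI (lines : List String) (j : Int) : Bool := kwN lines j.toNat
-- the sorted list of all header line numbers
def pvF (lines : List String) : List Nat := (List.range lines.length).filter (kwN lines)

theorem pv_find?_congr {α : Type} (l : List α) (p q : α → Bool)
    (h : ∀ a ∈ l, p a = q a) : l.find? p = l.find? q := by
  induction l with
  | nil => rfl
  | cons a t ih =>
    simp only [List.find?]
    rw [h a (by simp)]
    cases q a
    · exact ih (fun b hb => h b (by simp [hb]))
    · rfl

theorem pv_filterMap_if {α β : Type} (l : List α) (p : α → Bool) (f : α → β) :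
    l.filterMap (fun a => if p a then some (f a) else none) = (l.filter p).map f := by
  induction l with
  | nil => rfl
  | cons a t ih =>
    by_cases h : p a <;> simp [h, ih]

theorem pv_headers_eq (lines : List String) :
    (PySem.List.enumerate lines).filterMap (fun p => if pvKw p.2 then some p.1 else none)
      = (pvF lines).map (fun k : Nat => (k : Int)) := by
  rw [PySem.List.enumerate_eq_map_pyRange lines ""]
  rw [show PySem.List.len lines = ((lines.length : Nat) : Int) by simp]
  rw [PySem.List.pyRange_zero_natCast, List.map_map, List.filterMap_map]
  have h1 : List.filterMap
      ((fun p : Int × String => if pvKw p.2 = true then some p.1 else none) ∘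
        (fun j => (j, PySem.List.pyGetD lines j "")) ∘ fun k : Nat => (k : Int))
      (List.range lines.length)
      = List.filterMap (fun k : Nat => if kwN lines k then some ((k : Int)) else none)
          (List.range lines.length) := by
    apply List.filterMap_congr
    intro k hk
    simp [Function.comp, kwN, PySem.List.pyGetD_natCast]
  rw [h1, pv_filterMap_if]
  unfold pvF
  generalize List.filter (kwN lines) (List.range lines.length) = l
  induction l with
  | nil => rfl
  | cons a t ih => simpa using ih

theorem pv_get_in_range (lines : List String) (k : Nat) (hk : k < lines.length) :
    PySem.List.pyGet? lines (k : Int) = some (lines.getD k "") := by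
  rw [PySem.List.pyGet?_natCast, List.getElem?_eq_getElem hk, List.getD_eq_getElem?_getD,
    List.getElem?_eq_getElem hk]
  rfl

theorem pv_startA_find (lines : List String) (js : List Int)
    (h : ∀ j ∈ js, 0 ≤ j ∧ j < (lines.length : Int)) :
    pvFindStartA lines js = js.find? (kwI lines) := by
  induction js with
  | nil => rfl
  | cons j t ih =>
    obtain ⟨h0, h1⟩ := h j (by simp)
    have hk : j.toNat < lines.length := by omega
    have hg : PySem.List.pyGet? lines j = some (lines.getD j.toNat "") := by
      rw [← Int.toNat_of_nonneg h0]; exact pv_get_in_range lines j.toNat hk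
    have ht := ih (fun b hb => h b (by simp [hb]))
    have hgd : pvKw (lines[j.toNat]?.getD "") = pvKw (lines.getD j.toNat "") := by
      rw [List.getD_eq_getElem?_getD]
    by_cases hb : kwI lines j = true
    · have hb' : pvKw (lines.getD j.toNat "") = true := hb
      simp only [pvFindStartA, hg, List.find?_cons_of_pos hb]
      simp [hgd, hb']
      intro hc; rw [hb'] at hc; simp at hc
    · have hb' : pvKw (lines.getD j.toNat "") = false := by
        simpa [kwI, kwN] using hb
      simp only [pvFindStartA, hg, List.find?_cons_of_neg (by simpa using hb)]
      simp [hgd, hb', ht]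
      intro hc; rw [hb'] at hc; simp at hc

theorem pv_endA_find (lines : List String) (d : Int) (js : List Int)
    (h : ∀ j ∈ js, 0 ≤ j ∧ j < (lines.length : Int)) :
    pvFindEndA lines d js = (match js.find? (kwI lines) with
      | some j => j - 1
      | none => d) := by
  induction js with
  | nil => rfl
  | cons j t ih =>
    obtain ⟨h0, h1⟩ := h j (by simp)
    have hk : j.toNat < lines.length := by omega
    have hg : PySem.List.pyGet? lines j = some (lines.getD j.toNat "") := by
      rw [← Int.toNat_of_nonneg h0]; exact pv_get_in_range lines j.toNat hk
    have ht := ih (fun b hb => h b (by simp [hb]))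
    have hgd : pvKw (lines[j.toNat]?.getD "") = pvKw (lines.getD j.toNat "") := by
      rw [List.getD_eq_getElem?_getD]
    by_cases hb : kwI lines j = true
    · have hb' : pvKw (lines.getD j.toNat "") = true := hb
      simp only [pvFindEndA, hg, List.find?_cons_of_pos hb]
      simp [hgd, hb']
      intro hc; rw [hb'] at hc; simp at hc
    · have hb' : pvKw (lines.getD j.toNat "") = false := by
        simpa [kwI, kwN] using hb
      simp only [pvFindEndA, hg, List.find?_cons_of_neg (by simpa using hb)]
      simp [hgd, hb', ht]
      intro hc; rw [hb'] at hc; simp at hc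


theorem pv_reverse_range (m : Nat) :
    (List.range (m+1)).reverse = (List.range (m+1)).map (fun k => m - k) := by
  apply List.ext_getElem (by simp)
  intro i h1 h2
  simp only [List.length_reverse, List.length_range, List.length_map] at h1 h2
  simp [List.getElem_reverse]

theorem pv_filter_getLast {α : Type} (l : List α) (p : α → Bool) :
    (l.filter p).getLast? = l.reverse.find? p := by
  rw [List.getLast?_eq_head?_reverse, ← List.filter_reverse, List.head?_filter]

set_option maxHeartbeats 1000000 in
theorem pv_startA_eq (lines : List String) (E : Nat) (hE : E < lines.length) :
    pvFindStartA lines (PySem.List.pyRange (E : Int) (-1) (-1))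
      = ((List.range (E+1)).reverse.find? (kwN lines)).map (fun k : Nat => (k : Int)) := by
  have hR : PySem.List.pyRange (E : Int) (-1) (-1)
      = (List.range (E+1)).map (fun k : Nat => (E : Int) - (k : Int)) := by
    rw [PySem.List.pyRange_neg_one]
    rw [show ((E : Int) - (-1)).toNat = E + 1 by omega]
  have hb : ∀ j ∈ (List.range (E+1)).map (fun k : Nat => (E : Int) - (k : Int)),
      0 ≤ j ∧ j < (lines.length : Int) := by
    intro j hj
    simp only [List.mem_map, List.mem_range] at hj
    obtain ⟨k, hk, rfl⟩ := hj
    omega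
  rw [hR, pv_startA_find lines _ hb, List.find?_map]
  have hcg : (List.range (E+1)).find? (kwI lines ∘ fun k : Nat => (E : Int) - (k : Int))
      = (List.range (E+1)).find? (fun k => kwN lines (E - k)) := by
    apply pv_find?_congr
    intro k hk
    simp only [List.mem_range] at hk
    simp only [Function.comp, kwI]
    congr 1
    omega
  rw [hcg, pv_reverse_range, List.find?_map]
  have hcomp : (List.range (E+1)).find? ((kwN lines) ∘ fun k => E - k)
      = (List.range (E+1)).find? (fun k => kwN lines (E - k)) :=
    pv_find?_congr _ _ _ (fun a _ => by simp [Function.comp])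
  rw [hcomp]
  cases hW : (List.range (E+1)).find? (fun k => kwN lines (E - k)) with
  | none => rfl
  | some k =>
    have hk := List.mem_range.mp (List.mem_of_find?_eq_some hW)
    simp only [Option.map_some]
    congr 1
    omega

theorem pv_startB_eq (lines : List String) (E : Nat) :
    ((((pvF lines).map (fun k : Nat => (k : Int))).filter (fun h => decide (h ≤ (E : Int)))).getLast?)
      = ((List.range (E+1)).reverse.find? (kwN lines)).map (fun k : Nat => (k : Int)) := by
  rw [List.filter_map, List.getLast?_map]
  rw [List.filter_congr (q := fun k : Nat => decide (k ≤ E))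
      (fun a _ => by simp [Function.comp])]
  rw [pv_filter_getLast]
  unfold pvF
  rw [← List.filter_reverse, List.find?_filter]
  by_cases hcase : E + 1 ≤ lines.length
  · have hsplit : List.range lines.length
        = List.range (E+1) ++ (List.range (lines.length - (E+1))).map (fun x => (E+1) + x) := by
      rw [← List.range_add]; congr 1; omega
    rw [hsplit, List.reverse_append, List.find?_append]
    have h1 : ((List.range (lines.length - (E+1))).map (fun x => (E+1) + x)).reverse.find?
        (fun a => decide (kwN lines a = true ∧ (decide (a ≤ E)) = true)) = none := by
      rw [List.find?_eq_none]
      intro a ha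
      simp only [List.mem_reverse, List.mem_map, List.mem_range] at ha
      obtain ⟨x, hx, rfl⟩ := ha
      simp
      omega
    rw [h1, Option.none_or]
    refine congrArg (Option.map _) (pv_find?_congr _ _ _ ?_)
    intro a ha
    simp only [List.mem_reverse, List.mem_range] at ha
    cases h : kwN lines a <;> simp [h] <;> omega
  · -- lines.length ≤ E : every index already satisfies ≤ E, and range lines.length is a prefix of range (E+1)
    have hsplit : List.range (E+1)
        = List.range lines.length ++ (List.range (E+1 - lines.length)).map (fun x => lines.length + x) := by
      rw [← List.range_add]; congr 1; omega
    rw [hsplit, List.reverse_append, List.find?_append]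
    have h2 : ((List.range (E+1 - lines.length)).map (fun x => lines.length + x)).reverse.find?
        (kwN lines) = none := by
      rw [List.find?_eq_none]
      intro a ha
      simp only [List.mem_reverse, List.mem_map, List.mem_range] at ha
      obtain ⟨x, hx, rfl⟩ := ha
      unfold kwN
      rw [List.getD_eq_default]
      · simp [pvKw, PySem.Str.strip, PySem.Str.startswith]
        decide
      · omega
    rw [h2, Option.none_or]
    refine congrArg (Option.map _) (pv_find?_congr _ _ _ ?_)
    intro a ha
    simp only [List.mem_reverse, List.mem_range] at ha
    cases h : kwN lines a <;> simp [h] <;> omega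

theorem pv_find_max (lines : List String) (E k : Nat)
    (hW : (List.range (E+1)).reverse.find? (kwN lines) = some k) :
    kwN lines k = true ∧ k ≤ E ∧ ∀ m, kwN lines m = true → m ≤ E → m ≤ k := by
  obtain ⟨hp, as, bs, heq, hfail⟩ := (List.find?_eq_some_iff_append).mp hW
  have hpw : List.Pairwise (fun a b => a > b) ((List.range (E+1)).reverse) := by
    rw [List.pairwise_reverse]
    exact List.pairwise_lt_range
  refine ⟨hp, ?_, ?_⟩
  · have hk : k ∈ (List.range (E+1)).reverse := by rw [heq]; simp
    simp only [List.mem_reverse, List.mem_range] at hk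
    omega
  · intro m hm hmE
    by_contra hlt
    push_neg at hlt
    have hmem : m ∈ (List.range (E+1)).reverse := by
      simp only [List.mem_reverse, List.mem_range]; omega
    rw [heq] at hmem
    rcases List.mem_append.mp hmem with h | h
    · have := hfail m h
      simp [hm] at this
    · rw [heq] at hpw
      rcases List.mem_cons.mp h with rfl | h
      · omega
      · have := ((List.pairwise_append.mp hpw).2.1)
        have := (List.pairwise_cons.mp this).1 m h
        omega

theorem pv_endA_eq (lines : List String) (sN : Nat) (hs : sN < lines.length) (d : Int) :
    pvFindEndA lines d (PySem.List.pyRange ((sN : Int) + 1) (lines.length : Int) 1)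
      = (match (List.range (lines.length - (sN+1))).find? (fun k => kwN lines (sN+1+k)) with
         | some k => ((sN+1+k : Nat) : Int) - 1
         | none => d) := by
  have hR : PySem.List.pyRange ((sN : Int) + 1) (lines.length : Int) 1
      = (List.range (lines.length - (sN+1))).map (fun k : Nat => ((sN : Int) + 1) + (k : Int)) := by
    rw [PySem.List.pyRange_one]
    rw [show ((lines.length : Int) - ((sN : Int) + 1)).toNat = lines.length - (sN+1) by omega]
  have hb : ∀ j ∈ (List.range (lines.length - (sN+1))).map (fun k : Nat => ((sN : Int) + 1) + (k : Int)),
      0 ≤ j ∧ j < (lines.length : Int) := by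
    intro j hj
    simp only [List.mem_map, List.mem_range] at hj
    obtain ⟨k, hk, rfl⟩ := hj
    omega
  rw [hR, pv_endA_find lines d _ hb, List.find?_map]
  have hcg : (List.range (lines.length - (sN+1))).find? (kwI lines ∘ fun k : Nat => ((sN : Int) + 1) + (k : Int))
      = (List.range (lines.length - (sN+1))).find? (fun k => kwN lines (sN+1+k)) := by
    apply pv_find?_congr
    intro k hk
    simp only [Function.comp, kwI]
    rw [show ((sN : Int) + 1 + (k : Int)).toNat = sN + 1 + k by omega]
  rw [hcg]
  cases hW : (List.range (lines.length - (sN+1))).find? (fun k => kwN lines (sN+1+k)) with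
  | none => rfl
  | some k =>
    show ((sN : Int) + 1 + (k : Int)) - 1 = ((sN + 1 + k : Nat) : Int) - 1
    omega

theorem pv_endB_eq (lines : List String) (E sN : Nat) (hsE : sN ≤ E)
    (hmax : ∀ m, kwN lines m = true → m ≤ E → m ≤ sN) :
    ((((pvF lines).map (fun k : Nat => (k : Int))).filter (fun h => decide ((E : Int) < h))).head?)
      = ((List.range (lines.length - (sN+1))).find? (fun k => kwN lines (sN+1+k))).map
          (fun k => ((sN+1+k : Nat) : Int)) := by
  rw [List.filter_map, List.head?_map]
  rw [List.filter_congr (q := fun k : Nat => decide (E < k))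
      (fun a _ => by simp [Function.comp])]
  rw [List.head?_filter]
  unfold pvF
  rw [List.find?_filter]
  by_cases hcase : sN + 1 ≤ lines.length
  · have hsplit : List.range lines.length
        = List.range (sN+1) ++ (List.range (lines.length - (sN+1))).map (fun x => (sN+1) + x) := by
      rw [← List.range_add]; congr 1; omega
    rw [hsplit, List.find?_append]
    have h1 : (List.range (sN+1)).find?
        (fun a => decide (kwN lines a = true ∧ (decide (E < a)) = true)) = none := by
      rw [List.find?_eq_none]
      intro a ha
      simp only [List.mem_range] at ha
      simp
      omega
    rw [h1, Option.none_or, List.find?_map]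
    have hcg : (List.range (lines.length - (sN+1))).find?
        ((fun a => decide (kwN lines a = true ∧ (decide (E < a)) = true)) ∘ fun x => sN + 1 + x)
        = (List.range (lines.length - (sN+1))).find? (fun k => kwN lines (sN+1+k)) := by
      apply pv_find?_congr
      intro a ha
      simp only [Function.comp]
      cases h : kwN lines (sN+1+a) <;> simp [h]
      have := hmax (sN+1+a) h
      omega
    rw [hcg]
    cases (List.range (lines.length - (sN+1))).find? (fun k => kwN lines (sN+1+k)) <;> rfl
  · have hnil : lines.length - (sN+1) = 0 := by omega
    rw [hnil]
    simp only [List.range_zero, List.find?_nil, Option.map_none]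
    have h3 : (List.range lines.length).find?
        (fun a => decide (kwN lines a = true ∧ (decide (E < a)) = true)) = none := by
      rw [List.find?_eq_none]
      intro a ha
      simp only [List.mem_range] at ha
      simp
      intro hkw
      have := hmax a hkw
      omega
    rw [h3]
    rfl

-- ===== VERDICT (by name: the statement is the Claim_ definition above) =====
theorem find_theorem_bounds_spec : Claim_equal_find_theorem_bounds := by
  intro lines e _ hpre
  unfold Pre_find_theorem_bounds at hpre
  unfold Spec_find_theorem_bounds find_theorem_bounds find_theorem_bounds_alt
  simp only [pv_headers_eq]
  by_cases he : e < 0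
  · rw [PySem.List.pyRange_neg_one_eq_nil (by omega : e ≤ -1)]
    have hprev : (((pvF lines).map (fun k : Nat => (k : Int))).filter
        (fun h => decide (h ≤ e))) = [] := by
      apply List.filter_eq_nil_iff.mpr
      intro a ha
      simp only [List.mem_map] at ha
      obtain ⟨k, _, rfl⟩ := ha
      simp
      omega
    rw [hprev]
    simp [pvFindStartA]
  · have hE : e.toNat < lines.length := by omega
    have heE : e = (e.toNat : Int) := by omega
    rw [heE]
    have hA := pv_startA_eq lines e.toNat hE
    have hB := pv_startB_eq lines e.toNat
    cases hW : (List.range (e.toNat + 1)).reverse.find? (kwN lines) with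
    | none =>
      rw [hW] at hA hB
      simp only [Option.map_none] at hA hB
      rw [hA, hB]
    | some sN =>
      obtain ⟨hkw, hsE, hmax⟩ := pv_find_max lines e.toNat sN hW
      rw [hW] at hA hB
      simp only [Option.map_some] at hA hB
      rw [hA, hB]
      dsimp only
      have hsn : sN < lines.length := by omega
      rw [pv_endA_eq lines sN hsn, pv_endB_eq lines e.toNat sN hsE hmax]
      cases (List.range (lines.length - (sN+1))).find? (fun k => kwN lines (sN+1+k)) <;> rfl
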